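-- pv_equiv track=rewrite | github.com/gatencia/SOLOMUSE-MAIN | Training/02.preprocessing/prepare_dataset.py | interleave_chords
-- ===== SOURCE A (Python) =====
-- from typing import List, Tuple, Dict
--
-- def interleave_chords(chords: List[Tuple[int,str,str]], grid: int) -> List[str]:
--     """Turn chord timeline into tokens."""
--     tokens = []
--     last_step = 0
--     for step, root, qual in chords:
--         delta = step - last_step
--         while delta > 0:
--             shift = min(16, delta)
--             tokens.append(f"TIME_SHIFT_{shift}")
--             delta -= shift
--         tokens.append(f"CHORD_ROOT_{root}")
--         tokens.append(f"CHORD_QUAL_{qual}")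
--         last_step = step
--     return tokens
-- ===== SOURCE B (Python) =====
-- from typing import List, Tuple
--
-- def interleave_chords(chords: List[Tuple[int, str, str]], grid: int) -> List[str]:
--     """Turn chord timeline into tokens (closed-form time-shift chunking)."""
--     tokens = []
--     last_step = 0
--     for step, root, qual in chords:
--         delta = step - last_step
--         if delta > 0:
--             full, rem = divmod(delta, 16)
--             tokens.extend(["TIME_SHIFT_16"] * full)
--             if rem:
--                 tokens.append(f"TIME_SHIFT_{rem}")
--         tokens.append(f"CHORD_ROOT_{root}")
--         tokens.append(f"CHORD_QUAL_{qual}")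
--         last_step = step
--     return tokens
-- ===== Notes on version B (the rewrite author's own statement) =====
-- stated objective: simpler
-- what changed: Replaces the iterative while-loop subtraction that emits time-shift chunks with a closed-form divmod(delta, 16): full 16-step tokens via list multiplication plus one remainder token.
import Mathlib
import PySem

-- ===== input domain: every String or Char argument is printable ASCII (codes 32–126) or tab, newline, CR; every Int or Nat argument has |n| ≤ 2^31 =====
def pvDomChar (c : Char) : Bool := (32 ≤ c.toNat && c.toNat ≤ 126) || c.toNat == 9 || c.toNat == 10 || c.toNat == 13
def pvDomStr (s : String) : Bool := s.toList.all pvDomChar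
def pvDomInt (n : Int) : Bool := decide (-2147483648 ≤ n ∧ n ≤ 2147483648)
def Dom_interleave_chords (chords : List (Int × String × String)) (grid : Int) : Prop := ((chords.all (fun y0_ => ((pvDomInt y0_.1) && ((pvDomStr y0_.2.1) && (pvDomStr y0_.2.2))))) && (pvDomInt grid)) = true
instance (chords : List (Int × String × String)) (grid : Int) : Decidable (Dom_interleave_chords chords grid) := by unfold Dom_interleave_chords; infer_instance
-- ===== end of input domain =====

-- B replaces A's iterative while-loop chunking of each gap by a closed-form divmod(delta, 16); objective: simpler.

-- ===== PORT A =====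
-- the 'while delta > 0' inner loop of A
def interleaveShiftLoop (delta : Int) (tokens : List String) : List String :=
  if h : delta > 0 then
    let shift := min 16 delta
    interleaveShiftLoop (delta - shift) (tokens ++ ["TIME_SHIFT_" ++ PySem.Int.toStr shift])
  else tokens
termination_by delta.toNat
decreasing_by
  simp only [Int.lt_iff_add_one_le] at h
  omega

def interleave_chords (chords : List (Int × String × String)) (grid : Int) : List String :=
  (chords.foldl (fun (st : List String × Int) c =>
    let delta := c.1 - st.2
    let tokens := interleaveShiftLoop delta st.1
    (tokens ++ ["CHORD_ROOT_" ++ c.2.1, "CHORD_QUAL_" ++ c.2.2], c.1)) ([], 0)).1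

-- ===== PORT B =====
def interleave_chords_alt (chords : List (Int × String × String)) (grid : Int) : List String :=
  (chords.foldl (fun (st : List String × Int) c =>
    let delta := c.1 - st.2
    let ts : List String :=
      if delta > 0 then
        let full := PySem.Int.floordiv delta 16
        let rem := PySem.Int.mod delta 16
        List.replicate full.toNat "TIME_SHIFT_16" ++
          (if rem ≠ 0 then ["TIME_SHIFT_" ++ PySem.Int.toStr rem] else [])
      else []
    (st.1 ++ ts ++ ["CHORD_ROOT_" ++ c.2.1, "CHORD_QUAL_" ++ c.2.2], c.1)) ([], 0)).1

-- ===== PRECONDITION & SPEC =====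
def Spec_interleave_chords (chords : List (Int × String × String)) (grid : Int) (out : List String) : Prop := out = interleave_chords_alt chords grid
instance (chords : List (Int × String × String)) (grid : Int) (out : List String) : Decidable (Spec_interleave_chords chords grid out) := by unfold Spec_interleave_chords; infer_instance

-- ===== CLAIM (what is proved, stated in full; the proofs are below) =====
def Claim_equal_interleave_chords : Prop := ∀ (chords : List (Int × String × String)) (grid : Int), Dom_interleave_chords chords grid → Spec_interleave_chords chords grid (interleave_chords chords grid)

-- ===== LEMMAS AND PROOFS =====

-- A's while loop equals B's closed form, for every delta.
theorem shiftLoop_closed (n : Nat) : ∀ (delta : Int) (tokens : List String),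
    delta.toNat ≤ n → 0 < delta →
    interleaveShiftLoop delta tokens =
      tokens ++ List.replicate (delta / 16).toNat "TIME_SHIFT_16" ++
        (if delta % 16 ≠ 0 then ["TIME_SHIFT_" ++ PySem.Int.toStr (delta % 16)] else []) := by
  induction n with
  | zero => intro delta tokens hle hpos; omega
  | succ n ih =>
    intro delta tokens hle hpos
    rw [interleaveShiftLoop, dif_pos hpos]
    by_cases h16 : delta ≤ 16
    · have hmin : min (16 : Int) delta = delta := by omega
      rw [hmin]
      rw [interleaveShiftLoop, dif_neg (by omega : ¬ delta - delta > 0)]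
      by_cases he : delta = 16
      · subst he
        have h16s : ("TIME_SHIFT_" ++ PySem.Int.toStr 16) = "TIME_SHIFT_16" := by decide
        rw [h16s]; norm_num
      · have hdv : delta / 16 = 0 := by omega
        have hmv : delta % 16 = delta := by omega
        rw [hdv, hmv]
        simp [if_pos (by omega : delta ≠ 0)]
    · have hmin : min (16 : Int) delta = 16 := by omega
      rw [hmin]
      rw [ih (delta - 16) _ (by omega) (by omega)]
      have hq : delta / 16 = (delta - 16) / 16 + 1 := by omega
      have hr : delta % 16 = (delta - 16) % 16 := by omega
      rw [hq, hr]
      have hrep : (((delta - 16) / 16 + 1).toNat) = ((delta - 16) / 16).toNat + 1 := by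
        have : 0 ≤ (delta - 16) / 16 := Int.ediv_nonneg (by omega) (by norm_num)
        omega
      rw [hrep, List.replicate_succ]
      have h16s : ("TIME_SHIFT_" ++ PySem.Int.toStr 16) = "TIME_SHIFT_16" := by decide
      rw [h16s]
      simp

theorem interleaveShiftLoop_eq (delta : Int) (tokens : List String) :
    interleaveShiftLoop delta tokens =
      tokens ++
        (if delta > 0 then
          List.replicate (PySem.Int.floordiv delta 16).toNat "TIME_SHIFT_16" ++
            (if PySem.Int.mod delta 16 ≠ 0 then
              ["TIME_SHIFT_" ++ PySem.Int.toStr (PySem.Int.mod delta 16)] else [])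
        else []) := by
  by_cases h : delta > 0
  · rw [if_pos h, PySem.Int.floordiv_eq_ediv_of_pos (by norm_num),
      PySem.Int.mod_eq_emod_of_pos (by norm_num),
      shiftLoop_closed delta.toNat delta tokens le_rfl h, List.append_assoc]
  · rw [interleaveShiftLoop, dif_neg h, if_neg h, List.append_nil]

theorem interleave_step_eq :
    (fun (st : List String × Int) (c : Int × String × String) =>
      let delta := c.1 - st.2
      let tokens := interleaveShiftLoop delta st.1
      (tokens ++ ["CHORD_ROOT_" ++ c.2.1, "CHORD_QUAL_" ++ c.2.2], c.1))
    = (fun (st : List String × Int) (c : Int × String × String) =>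
      let delta := c.1 - st.2
      let ts : List String :=
        if delta > 0 then
          let full := PySem.Int.floordiv delta 16
          let rem := PySem.Int.mod delta 16
          List.replicate full.toNat "TIME_SHIFT_16" ++
            (if rem ≠ 0 then ["TIME_SHIFT_" ++ PySem.Int.toStr rem] else [])
        else []
      (st.1 ++ ts ++ ["CHORD_ROOT_" ++ c.2.1, "CHORD_QUAL_" ++ c.2.2], c.1)) := by
  funext st c
  simp only [interleaveShiftLoop_eq, List.append_assoc]

-- ===== VERDICT (by name: the statement is the Claim_ definition above) =====
theorem interleave_chords_spec : Claim_equal_interleave_chords := by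
  intro chords grid _
  unfold Spec_interleave_chords interleave_chords interleave_chords_alt
  rw [interleave_step_eq]
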